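-- pv_equiv track=rewrite | github.com/adarshs02/adapative-emotion | EmoBIRD/factor_generator.py | _sanitize_situation_text
-- ===== SOURCE A (Python) =====
-- def _sanitize_situation_text(user_situation: str) -> str:
--     """Sanitize situation text to avoid contaminating prompts with unrelated formatting blocks.
--
--     - If the situation contains a block starting with 'Respond in exactly this output format:',
--       drop everything from that marker onward.
--     - Also truncate before headers like "# I'm thinking & feeling" if present.
--     - Preserve the original dialogue/content before those markers.
--     """
--     if not user_situation:
--         return user_situation
--     markers = [
--         "Respond in exactly this output format:",
--         "# I'm thinking & feeling",
--     ]
--     cleaned = user_situation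
--     for m in markers:
--         idx = cleaned.find(m)
--         if idx != -1:
--             cleaned = cleaned[:idx].strip()
--     return cleaned
-- ===== SOURCE B (Python) =====
-- def _sanitize_situation_text(user_situation: str) -> str:
--     markers = [
--         "Respond in exactly this output format:",
--         "# I'm thinking & feeling",
--     ]
--     hits = [p for p in (user_situation.find(m) for m in markers) if p != -1]
--     if not hits:
--         return user_situation
--     return user_situation[:min(hits)].strip()
-- ===== Notes on version B (the rewrite author's own statement) =====
-- stated objective: simpler
-- what changed: B replaces A's sequential truncate-and-strip loop (which re-searches the progressively truncated text) with a single pass: find each marker's position in the original text, cut once at the earliest hit, and strip once; no marker means the text is returned untouched.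
import Mathlib
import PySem

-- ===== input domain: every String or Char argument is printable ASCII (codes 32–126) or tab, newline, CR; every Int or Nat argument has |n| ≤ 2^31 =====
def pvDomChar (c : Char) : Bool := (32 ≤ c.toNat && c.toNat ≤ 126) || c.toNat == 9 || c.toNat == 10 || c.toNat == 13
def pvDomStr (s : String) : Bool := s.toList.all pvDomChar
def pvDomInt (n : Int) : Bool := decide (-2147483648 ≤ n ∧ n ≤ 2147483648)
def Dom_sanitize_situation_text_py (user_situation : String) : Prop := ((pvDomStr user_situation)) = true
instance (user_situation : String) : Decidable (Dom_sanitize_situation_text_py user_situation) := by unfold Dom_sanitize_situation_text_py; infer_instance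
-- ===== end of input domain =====

-- B replaces A's sequential truncate-and-strip loop (which re-searches the progressively
-- truncated text) with a single pass: find each marker in the original text, cut once at the
-- earliest hit, strip once; no marker means the text is returned untouched (objective: simpler).

def pvMarkers : List String :=
  ["Respond in exactly this output format:",
   "# I'm thinking & feeling"]

-- ===== PORT A =====
def sanitize_situation_text_py (user_situation : String) : String :=
  if user_situation = "" then user_situation
  else
    pvMarkers.foldl (fun cleaned m =>
      let idx := PySem.Str.find cleaned m
      if idx ≠ -1 then PySem.Str.strip (PySem.Str.slice cleaned none (some idx))
      else cleaned) user_situation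

-- ===== PORT B =====
def sanitize_situation_text_py_alt (user_situation : String) : String :=
  let hits := (pvMarkers.map (fun m => PySem.Str.find user_situation m)).filter (fun p => p != -1)
  match PySem.List.min? hits id with
  | none => user_situation
  | some cut => PySem.Str.strip (PySem.Str.slice user_situation none (some cut))

-- ===== PRECONDITION & SPEC =====
def Spec_sanitize_situation_text_py (user_situation : String) (out : String) : Prop := out = sanitize_situation_text_py_alt user_situation
instance (user_situation : String) (out : String) : Decidable (Spec_sanitize_situation_text_py user_situation out) := by unfold Spec_sanitize_situation_text_py; infer_instance

-- ===== CLAIM (what is proved, stated in full; the proofs are below) =====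
def Claim_equal_sanitize_situation_text_py : Prop := ∀ (user_situation : String), Dom_sanitize_situation_text_py user_situation → Spec_sanitize_situation_text_py user_situation (sanitize_situation_text_py user_situation)

-- ===== LEMMAS AND PROOFS =====

-- rstrip is a prefix of its argument
theorem pv_rstrip_prefix (v : List Char) : PySem.Chars.rstrip v <+: v := by
  unfold PySem.Chars.rstrip
  conv_rhs => rw [← List.reverse_reverse v]
  rw [List.reverse_prefix]
  exact List.dropWhile_suffix _

theorem pv_strip_infix (v : List Char) : PySem.Chars.strip v <:+: v := by
  unfold PySem.Chars.strip PySem.Chars.lstrip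
  exact (pv_rstrip_prefix _).isInfix.trans (List.dropWhile_suffix _).isInfix

theorem pv_rstrip_decomp (v : List Char) :
    ∃ w, v = PySem.Chars.rstrip v ++ w ∧ ∀ c ∈ w, PySem.Chars.isspace c = true := by
  refine ⟨(v.reverse.takeWhile PySem.Chars.isspace).reverse, ?_, ?_⟩
  · unfold PySem.Chars.rstrip
    rw [← List.reverse_append, List.takeWhile_append_dropWhile, List.reverse_reverse]
  · intro c hc
    rw [List.mem_reverse] at hc
    exact List.mem_takeWhile_imp hc

theorem pv_dropWhile_ws_append (W x : List Char)
    (h : ∀ c ∈ W, PySem.Chars.isspace c = true) :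
    List.dropWhile PySem.Chars.isspace (W ++ x) = List.dropWhile PySem.Chars.isspace x := by
  induction W with
  | nil => rfl
  | cons a W ih =>
    rw [List.cons_append, List.dropWhile_cons_of_pos (h a (by simp))]
    exact ih fun c hc => h c (by simp [hc])

theorem pv_strip_ws_prepend (W x : List Char)
    (h : ∀ c ∈ W, PySem.Chars.isspace c = true) :
    PySem.Chars.strip (W ++ x) = PySem.Chars.strip x := by
  unfold PySem.Chars.strip PySem.Chars.lstrip
  rw [pv_dropWhile_ws_append W x h]

theorem pv_not_prefix_drop (m x : List Char) (h : ¬ m <:+: x) : ∀ i, ¬ m <+: x.drop i := by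
  intro i hp
  exact h (hp.isInfix.trans (List.drop_suffix i x).isInfix)

theorem pv_prefix_take_drop (m s : List Char) (j p : Nat) (hm : m ≠ [])
    (h : m <+: (List.take p s).drop j) : j < p ∧ m <+: s.drop j := by
  rw [List.drop_take, List.prefix_take_iff] at h
  have hlen : 0 < m.length := List.length_pos_iff.mpr hm
  exact ⟨by omega, h.1⟩

theorem pv_kill (s m : List Char) (hm : m ≠ []) (q : Nat)
    (hmin : ∀ i < q, ¬ m <+: s.drop i) :
    PySem.Chars.find (PySem.Chars.strip (List.take q s)) m = -1 := by
  rw [PySem.Chars.find_eq_neg_one_iff]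
  intro hinf
  have h2 : m <:+: List.take q s := hinf.trans (pv_strip_infix _)
  obtain ⟨j, hj⟩ := (PySem.Chars.exists_prefix_drop_iff_isIn ..).mpr
    ((PySem.Chars.isIn_iff_infix ..).mpr h2)
  obtain ⟨hjq, hj'⟩ := pv_prefix_take_drop m s j q hm hj
  exact hmin j hjq hj'

theorem pv_nooverlap (s m1 m2 : List Char) (p q : Nat) (c : Char)
    (hc : m1.head? = some c) (hcnot : c ∉ m2)
    (hocc2 : m2 <+: s.drop p) (hocc1 : m1 <+: s.drop q) (hpq : p < q) :
    p + m2.length ≤ q := by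
  by_contra hcon
  push Not at hcon
  have hm1 : 0 < m1.length := by cases m1 <;> simp_all
  have hlen1 : m1.length ≤ (s.drop q).length := hocc1.length_le
  have hsq : q < s.length := by simp at hlen1; omega
  have hlen2 : m2.length ≤ (s.drop p).length := hocc2.length_le
  have hi : q - p < m2.length := by omega
  have e1 : m2[q - p] = (s.drop p)[q - p]'(by simp; omega) := (List.IsPrefix.getElem hocc2 _)
  have e2 : (s.drop p)[q - p]'(by simp; omega) = s[q]'hsq := by
    rw [List.getElem_drop]; congr 1; omega
  have e3 : m1[0]'hm1 = (s.drop q)[0]'(by omega) := List.IsPrefix.getElem hocc1 _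
  have e4 : (s.drop q)[0]'(by omega) = s[q]'hsq := by rw [List.getElem_drop]; congr 1
  have hc0 : m1[0]'hm1 = c := by
    cases m1 with
    | nil => simp at hm1
    | cons a t => simp at hc; simp [hc]
  apply hcnot
  have : m2[q - p] = c := by rw [e1, e2, ← e4, ← e3, hc0]
  exact this ▸ List.getElem_mem hi

theorem pv_main (s m : List Char) (p q : Nat) (hm : m ≠ [])
    (hhead : m.head?.all (fun c => !PySem.Chars.isspace c) = true)
    (hlast : m.getLast?.all (fun c => !PySem.Chars.isspace c) = true)
    (hocc : m <+: s.drop p) (hmin : ∀ i < p, ¬ m <+: s.drop i)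
    (hpq : p < q) (hfit : p + m.length ≤ q) (hq : q ≤ s.length) :
    PySem.Chars.find (PySem.Chars.strip (List.take q s)) m ≠ -1 ∧
    PySem.Chars.strip (List.take
        (PySem.Chars.find (PySem.Chars.strip (List.take q s)) m).toNat
        (PySem.Chars.strip (List.take q s))) = PySem.Chars.strip (List.take p s) := by
  have hml : 0 < m.length := List.length_pos_iff.mpr hm
  set t := List.take q s with ht_def
  set W := t.takeWhile PySem.Chars.isspace with hW_def
  set b := PySem.Chars.strip t with hb_def
  obtain ⟨V, hV, hwsV⟩ := pv_rstrip_decomp (PySem.Chars.lstrip t)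
  have hwsW : ∀ c ∈ W, PySem.Chars.isspace c = true := fun c hc => List.mem_takeWhile_imp hc
  have hbV : PySem.Chars.lstrip t = b ++ V := by
    rw [hb_def]; unfold PySem.Chars.strip; exact hV
  have ht : t = W ++ (b ++ V) := by
    rw [← hbV]
    exact (List.takeWhile_append_dropWhile (p := PySem.Chars.isspace) (l := t)).symm
  have htlen : t.length = q := by rw [ht_def, List.length_take]; omega
  have hsum : W.length + (b.length + V.length) = q := by
    rw [← htlen, ht]; simp
  -- the occurrence of m lies inside t
  have hoccT : m <+: t.drop p := by
    have hdt : t.drop p = List.take (q - p) (s.drop p) := by rw [ht_def, List.drop_take]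
    rw [hdt, List.prefix_take_iff]
    exact ⟨hocc, by omega⟩
  -- the leading whitespace ends before the occurrence
  have hlead : W.length ≤ p := by
    by_contra hcon
    push Not at hcon
    have hdt : t.drop p = W.drop p ++ (b ++ V) := by
      rw [ht, List.drop_append]
      congr 1
      have h0 : p - W.length = 0 := by omega
      rw [h0, List.drop_zero]
    obtain ⟨c, m', hm'⟩ := List.exists_cons_of_ne_nil hm
    obtain ⟨d, w', hw'⟩ := List.exists_cons_of_ne_nil
      (show W.drop p ≠ [] by
        intro h0
        have := congrArg List.length h0
        simp at this; omega)
    rw [hm', hdt, hw'] at hoccT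
    rw [List.cons_append, List.cons_prefix_cons] at hoccT
    have hdW : d ∈ W := List.mem_of_mem_drop (by rw [hw']; exact List.mem_cons_self ..)
    have hws_d := hwsW d hdW
    rw [hm'] at hhead
    simp at hhead
    rw [hoccT.1, hws_d] at hhead
    exact absurd hhead (by simp)
  -- the occurrence, seen inside b ++ V
  have hoccU : m <+: (b ++ V).drop (p - W.length) := by
    have hdt : t.drop p = (b ++ V).drop (p - W.length) := by
      rw [ht, List.drop_append, List.drop_eq_nil_of_le (by omega), List.nil_append]
    rwa [hdt] at hoccT
  -- the occurrence fits inside b (= strip t): its last char is non-whitespace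
  have hfitb : p - W.length + m.length ≤ b.length := by
    by_contra hcon
    push Not at hcon
    have hlenU : m.length ≤ ((b ++ V).drop (p - W.length)).length := hoccU.length_le
    simp at hlenU
    have hi : m.length - 1 < m.length := by omega
    have e1 : m[m.length - 1] = ((b ++ V).drop (p - W.length))[m.length - 1]'(by simp; omega) :=
      hoccU.getElem hi
    have e2 : ((b ++ V).drop (p - W.length))[m.length - 1]'(by simp; omega)
        = (b ++ V)[p - W.length + (m.length - 1)]'(by simp; omega) := by
      rw [List.getElem_drop]
    have e3 : (b ++ V)[p - W.length + (m.length - 1)]'(by simp; omega)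
        = V[p - W.length + (m.length - 1) - b.length]'(by omega) :=
      List.getElem_append_right (by omega)
    have hmemV : m[m.length - 1] ∈ V := by
      rw [e1, e2, e3]; exact List.getElem_mem _
    have hwsl := hwsV _ hmemV
    rw [List.getLast?_eq_getLast hm, List.getLast_eq_getElem] at hlast
    simp at hlast
    rw [hwsl] at hlast
    exact absurd hlast (by simp)
  -- occurrence inside b itself
  have hoccB : m <+: b.drop (p - W.length) := by
    have hdu : (b ++ V).drop (p - W.length) = b.drop (p - W.length) ++ V := by
      rw [List.drop_append]
      congr 1
      have h0 : p - W.length - b.length = 0 := by omega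
      rw [h0, List.drop_zero]
    rw [hdu] at hoccU
    rw [List.prefix_iff_eq_take] at hoccU
    rw [List.take_append_of_le_length (by simp; omega)] at hoccU
    rw [List.prefix_iff_eq_take]
    exact hoccU
  -- no occurrence in b before p - W.length
  have hminB : ∀ i < p - W.length, ¬ m <+: b.drop i := by
    intro i hi hp'
    have h1 : m <+: b.drop i ++ V := hp'.trans (List.prefix_append _ _)
    have h2 : (b ++ V).drop i = b.drop i ++ V := by
      rw [List.drop_append]
      congr 1
      have h0 : i - b.length = 0 := by omega
      rw [h0, List.drop_zero]
    have h3 : t.drop (W.length + i) = (b ++ V).drop i := by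
      rw [ht, List.drop_append, List.drop_eq_nil_of_le (by omega), List.nil_append]
      congr 1
      omega
    have h4 : m <+: t.drop (W.length + i) := by rw [h3, h2]; exact h1
    have h5 : t.drop (W.length + i) = List.take (q - (W.length + i)) (s.drop (W.length + i)) := by
      rw [ht_def, List.drop_take]
    have h6 : m <+: s.drop (W.length + i) := by
      rw [h5] at h4
      exact h4.trans (List.take_prefix _ _)
    exact hmin (W.length + i) (by omega) h6
  -- the find in b lands exactly at p - W.length
  have hinf : m <:+: b :=
    (PySem.Chars.isIn_iff_infix ..).mp
      ((PySem.Chars.exists_prefix_drop_iff_isIn ..).mp ⟨_, hoccB⟩)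
  have h0f : 0 ≤ PySem.Chars.find b m := (PySem.Chars.find_nonneg_iff ..).mpr hinf
  obtain ⟨hf1, hf2⟩ := PySem.Chars.find_spec h0f
  have htoNat : (PySem.Chars.find b m).toNat = p - W.length := by
    rcases Nat.lt_trichotomy (PySem.Chars.find b m).toNat (p - W.length) with h | h | h
    · exact absurd hf1 (hminB _ h)
    · exact h
    · exact absurd hoccB (hf2 _ h)
  have hfind : PySem.Chars.find b m = ((p - W.length : Nat) : Int) := by
    rw [← Int.toNat_of_nonneg h0f, htoNat]
  constructor
  · rw [hfind]; omega
  · rw [hfind]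
    have htn : ((p - W.length : Nat) : Int).toNat = p - W.length := by omega
    rw [htn]
    have hsplit : List.take p s = W ++ List.take (p - W.length) b := by
      have h1 : List.take p s = List.take p t := by
        rw [ht_def, List.take_take, Nat.min_eq_left (Nat.le_of_lt hpq)]
      rw [h1, ht, List.take_append, List.take_of_length_le (by omega), List.take_append]
      have h0 : p - W.length - b.length = 0 := by omega
      rw [h0, List.take_zero, List.append_nil]
    rw [hsplit, pv_strip_ws_prepend W _ hwsW]


-- computing Python min() on one- and two-element lists
theorem pv_min1 (a : Int) : PySem.List.min? [a] id = some a := by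
  unfold PySem.List.min?; simp

theorem pv_min2 (a b : Int) : PySem.List.min? [a, b] id = some (if b < a then b else a) := by
  unfold PySem.List.min?; simp [List.foldl]; split <;> rfl

-- String-level congruence for strip
theorem pv_strip_congr (u v : String)
    (h : PySem.Chars.strip u.toList = PySem.Chars.strip v.toList) :
    PySem.Str.strip u = PySem.Str.strip v := by
  unfold PySem.Str.strip; rw [h]

-- ===== VERDICT (by name: the statement is the Claim_ definition above) =====
theorem sanitize_situation_text_py_spec : Claim_equal_sanitize_situation_text_py := by
  intro s _hdom
  unfold Spec_sanitize_situation_text_py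
  by_cases hs : s = ""
  · subst hs; decide
  · rw [sanitize_situation_text_py, if_neg hs]
    rw [sanitize_situation_text_py_alt]
    simp only [pvMarkers, List.foldl_cons, List.foldl_nil, List.map_cons, List.map_nil,
      List.filter_cons, List.filter_nil]
    by_cases h1 : PySem.Str.find s "Respond in exactly this output format:" = -1
    · rw [if_neg (show ¬(PySem.Str.find s "Respond in exactly this output format:" ≠ -1) from
          not_not_intro h1),
        if_neg (show ¬((PySem.Str.find s "Respond in exactly this output format:" != -1) = true) by
          simp only [bne_iff_ne, ne_eq]; exact not_not_intro h1)]
      by_cases h2 : PySem.Str.find s "# I'm thinking & feeling" = -1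
      · rw [if_neg (show ¬(PySem.Str.find s "# I'm thinking & feeling" ≠ -1) from
            not_not_intro h2),
          if_neg (show ¬((PySem.Str.find s "# I'm thinking & feeling" != -1) = true) by
            simp only [bne_iff_ne, ne_eq]; exact not_not_intro h2)]
        rfl
      · rw [if_pos h2, if_pos (show (PySem.Str.find s "# I'm thinking & feeling" != -1) = true by
            simp only [bne_iff_ne, ne_eq]; exact h2)]
        rw [pv_min1]
    · have h0f1 : 0 ≤ PySem.Str.find s "Respond in exactly this output format:" := by
        have := PySem.Chars.neg_one_le_find s.toList
          ("Respond in exactly this output format:" : String).toList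
        rw [← PySem.Str.find_eq] at this
        omega
      rw [if_pos h1,
        if_pos (show (PySem.Str.find s "Respond in exactly this output format:" != -1) = true by
          simp only [bne_iff_ne, ne_eq]; exact h1)]
      have hstep1 : (PySem.Str.strip (PySem.Str.slice s none
            (some (PySem.Str.find s "Respond in exactly this output format:")))).toList
          = PySem.Chars.strip (List.take
            (PySem.Str.find s "Respond in exactly this output format:").toNat s.toList) := by
        rw [PySem.Str.toList_strip, PySem.Str.toList_slice, PySem.Chars.slice_eq_listSlice,
          PySem.List.slice_to _ h0f1]
      have hfind2 : PySem.Str.find (PySem.Str.strip (PySem.Str.slice s none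
            (some (PySem.Str.find s "Respond in exactly this output format:"))))
            "# I'm thinking & feeling"
          = PySem.Chars.find (PySem.Chars.strip (List.take
            (PySem.Str.find s "Respond in exactly this output format:").toNat s.toList))
            ("# I'm thinking & feeling" : String).toList := by
        rw [PySem.Str.find_eq, hstep1]
      have hm2ne : ("# I'm thinking & feeling" : String).toList ≠ [] := by decide
      -- the first marker's first occurrence, at list level
      have hfeq1 : PySem.Chars.find s.toList
            ("Respond in exactly this output format:" : String).toList
          = PySem.Str.find s "Respond in exactly this output format:" :=
        (PySem.Str.find_eq ..).symm
      have h1' : 0 ≤ PySem.Chars.find s.toList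
          ("Respond in exactly this output format:" : String).toList := by
        rw [hfeq1]; exact h0f1
      obtain ⟨hocc1, hmin1⟩ := PySem.Chars.find_spec h1'
      rw [hfeq1] at hocc1 hmin1
      have hq1 : (PySem.Str.find s "Respond in exactly this output format:").toNat
          ≤ s.toList.length := by
        have := PySem.Chars.find_le_length s.toList
          ("Respond in exactly this output format:" : String).toList
        rw [hfeq1] at this
        omega
      by_cases h2 : PySem.Str.find s "# I'm thinking & feeling" = -1
      · -- second marker nowhere in s: A keeps step1, B cuts at f1
        have hnone : ∀ i, ¬ ("# I'm thinking & feeling" : String).toList <+: s.toList.drop i :=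
          pv_not_prefix_drop _ _ ((PySem.Chars.find_eq_neg_one_iff ..).mp
            (by rw [PySem.Str.find_eq] at h2; exact h2))
        have hK : PySem.Str.find (PySem.Str.strip (PySem.Str.slice s none
              (some (PySem.Str.find s "Respond in exactly this output format:"))))
              "# I'm thinking & feeling" = -1 := by
          rw [hfind2]
          exact pv_kill s.toList _ hm2ne _ (fun i _ => hnone i)
        rw [if_neg (not_not_intro hK),
          if_neg (show ¬((PySem.Str.find s "# I'm thinking & feeling" != -1) = true) by
            simp only [bne_iff_ne, ne_eq]; exact not_not_intro h2)]
        rw [pv_min1]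
      · have h0f2 : 0 ≤ PySem.Str.find s "# I'm thinking & feeling" := by
          have := PySem.Chars.neg_one_le_find s.toList
            ("# I'm thinking & feeling" : String).toList
          rw [← PySem.Str.find_eq] at this
          omega
        have hfeq2 : PySem.Chars.find s.toList ("# I'm thinking & feeling" : String).toList
            = PySem.Str.find s "# I'm thinking & feeling" := (PySem.Str.find_eq ..).symm
        have h2' : 0 ≤ PySem.Chars.find s.toList
            ("# I'm thinking & feeling" : String).toList := by
          rw [hfeq2]; exact h0f2
        obtain ⟨hocc2, hmin2⟩ := PySem.Chars.find_spec h2'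
        rw [hfeq2] at hocc2 hmin2
        rw [if_pos (show (PySem.Str.find s "# I'm thinking & feeling" != -1) = true by
          simp only [bne_iff_ne, ne_eq]; exact h2)]
        by_cases h12 : PySem.Str.find s "# I'm thinking & feeling"
            < PySem.Str.find s "Respond in exactly this output format:"
        · -- second marker strictly first: A truncates twice, B cuts at f2
          have hpq : (PySem.Str.find s "# I'm thinking & feeling").toNat
              < (PySem.Str.find s "Respond in exactly this output format:").toNat := by omega
          have hfit := pv_nooverlap s.toList
            ("Respond in exactly this output format:" : String).toList
            ("# I'm thinking & feeling" : String).toList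
            (PySem.Str.find s "# I'm thinking & feeling").toNat
            (PySem.Str.find s "Respond in exactly this output format:").toNat
            'R' (by decide) (by decide) hocc2 hocc1 hpq
          obtain ⟨hne, heq⟩ := pv_main s.toList ("# I'm thinking & feeling" : String).toList
            (PySem.Str.find s "# I'm thinking & feeling").toNat
            (PySem.Str.find s "Respond in exactly this output format:").toNat
            hm2ne (by decide) (by decide) hocc2 hmin2 hpq hfit hq1
          rw [if_pos (show PySem.Str.find (PySem.Str.strip (PySem.Str.slice s none
              (some (PySem.Str.find s "Respond in exactly this output format:"))))
              "# I'm thinking & feeling" ≠ -1 by rw [hfind2]; exact hne)]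
          rw [pv_min2, if_pos h12]
          have h0fs : 0 ≤ PySem.Str.find (PySem.Str.strip (PySem.Str.slice s none
              (some (PySem.Str.find s "Respond in exactly this output format:"))))
              "# I'm thinking & feeling" := by
            rw [hfind2]
            have := PySem.Chars.neg_one_le_find (PySem.Chars.strip (List.take
              (PySem.Str.find s "Respond in exactly this output format:").toNat s.toList))
              ("# I'm thinking & feeling" : String).toList
            omega
          apply pv_strip_congr
          rw [PySem.Str.toList_slice, PySem.Str.toList_slice, PySem.Chars.slice_eq_listSlice,
            PySem.Chars.slice_eq_listSlice, PySem.List.slice_to _ h0fs,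
            PySem.List.slice_to _ h0f2, hstep1, hfind2]
          exact heq
        · -- first marker first: the truncation removes the second marker
          have hK : PySem.Str.find (PySem.Str.strip (PySem.Str.slice s none
                (some (PySem.Str.find s "Respond in exactly this output format:"))))
                "# I'm thinking & feeling" = -1 := by
            rw [hfind2]
            refine pv_kill s.toList _ hm2ne _ (fun i hi => ?_)
            exact hmin2 i (by omega)
          rw [if_neg (not_not_intro hK)]
          rw [pv_min2, if_neg h12]
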